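-- pv_equiv track=rewrite | github.com/prestigeworldwidecr/CodeSignal | Sorting and Searching Algorithms in Python/unit1/practice2.py | recursiveSumEven
-- ===== SOURCE A (Python) =====
-- def recursiveSumEven(arr, idx = 0) :
-- # {
--     # implement this
--
--     if (idx >= len(arr)) :
--     # {
--         return 0
--     # }
--
--     # even
--     elif (idx % 2 == 0):
--     # {
--         if (idx <= len(arr) - 1) :
--         # {
--             return arr[idx] + recursiveSumEven(arr, idx + 1)
--         # }
--
--         else :
--         # {
--             return 0
--         # }
--
--     # }
--
--     # odd
--     elif (idx % 2 == 1):
--     # {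
--         # return "odd"
--         return recursiveSumEven(arr, idx + 1)
--     # }
--
--     else :
--     # {
--         None
-- ===== SOURCE B (Python) =====
-- def recursiveSumEven(arr, idx = 0):
--     total = 0
--     for i in range(idx, len(arr)):
--         if i % 2 == 0:
--             total += arr[i]
--     return total
-- ===== Notes on version B (the rewrite author's own statement) =====
-- stated objective: idiomatic
-- what changed: Replaces the recursive index-threading (with its redundant bounds re-check and parity branch chain) by a single flat loop over range(idx, len(arr)) accumulating the even-index elements.
import Mathlib
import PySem

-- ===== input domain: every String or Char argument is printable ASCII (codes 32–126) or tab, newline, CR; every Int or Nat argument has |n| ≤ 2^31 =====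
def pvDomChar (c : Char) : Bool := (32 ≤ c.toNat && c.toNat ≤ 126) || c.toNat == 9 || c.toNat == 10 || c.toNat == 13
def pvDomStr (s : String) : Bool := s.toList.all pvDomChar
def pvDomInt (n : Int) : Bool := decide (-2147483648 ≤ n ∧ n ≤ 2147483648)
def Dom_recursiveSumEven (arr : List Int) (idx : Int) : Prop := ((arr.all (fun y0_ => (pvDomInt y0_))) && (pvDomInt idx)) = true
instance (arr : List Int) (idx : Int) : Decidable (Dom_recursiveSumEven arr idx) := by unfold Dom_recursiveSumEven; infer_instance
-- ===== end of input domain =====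

-- B replaces A's recursion over idx by one flat accumulating loop over range(idx, len(arr)) (idiomatic, O(1) space).

-- ===== PORT A =====
-- literal port of A's recursion; arr[idx] → pyGetD (valid: Pre_ excludes the indices where Python raises IndexError)
def recursiveSumEven (arr : List Int) (idx : Int) : Int :=
  if idx ≥ (arr.length : Int) then 0
  else if idx % 2 == 0 then
    if idx ≤ (arr.length : Int) - 1 then
      PySem.List.pyGetD arr idx 0 + recursiveSumEven arr (idx + 1)
    else 0
  else if idx % 2 == 1 then recursiveSumEven arr (idx + 1)
  else 0  -- Python's final else is unreachable (idx % 2 ∈ {0,1} for ints)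
termination_by ((arr.length : Int) - idx).toNat
decreasing_by all_goals omega

-- ===== PORT B =====
def recursiveSumEven_alt (arr : List Int) (idx : Int) : Int :=
  (PySem.List.pyRange idx (arr.length : Int) 1).foldl
    (fun total i => if i % 2 == 0 then total + PySem.List.pyGetD arr i 0 else total) 0

-- ===== PRECONDITION & SPEC =====
-- Pre_ excludes exactly the inputs where Python A raises IndexError (an even index i ≥ idx with i < -len(arr)); B raises there too.
def Pre_recursiveSumEven (arr : List Int) (idx : Int) : Prop :=
  -(arr.length : Int) ≤ idx ∨ (idx = -(arr.length : Int) - 1 ∧ idx % 2 = 1)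
instance (arr : List Int) (idx : Int) : Decidable (Pre_recursiveSumEven arr idx) := by
  unfold Pre_recursiveSumEven; infer_instance
def pvWitness_recursiveSumEven : List Int × Int := ([1, 2, 3, 4, 5], 0)
def Spec_recursiveSumEven (arr : List Int) (idx : Int) (out : Int) : Prop := out = recursiveSumEven_alt arr idx
instance (arr : List Int) (idx : Int) (out : Int) : Decidable (Spec_recursiveSumEven arr idx out) := by unfold Spec_recursiveSumEven; infer_instance

-- ===== CLAIM (what is proved, stated in full; the proofs are below) =====
def Claim_equal_recursiveSumEven : Prop := ∀ (arr : List Int) (idx : Int), Dom_recursiveSumEven arr idx → Pre_recursiveSumEven arr idx → Spec_recursiveSumEven arr idx (recursiveSumEven arr idx)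

-- ===== LEMMAS AND PROOFS =====

-- the fold distributes over its accumulator
theorem pvFoldl_acc (arr : List Int) (l : List Int) (c : Int) :
    l.foldl (fun total i => if i % 2 == 0 then total + PySem.List.pyGetD arr i 0 else total) c
    = c + l.foldl (fun total i => if i % 2 == 0 then total + PySem.List.pyGetD arr i 0 else total) 0 := by
  induction l generalizing c with
  | nil => simp
  | cons x xs ih =>
      simp only [List.foldl_cons]
      rw [ih, ih (if (x % 2 == 0) then 0 + PySem.List.pyGetD arr x 0 else 0)]
      split <;> ring

theorem pvMain (arr : List Int) (idx : Int) :
    recursiveSumEven arr idx = recursiveSumEven_alt arr idx := by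
  unfold recursiveSumEven_alt
  induction idx using recursiveSumEven.induct arr with
  | case1 idx h =>
      rw [recursiveSumEven]
      simp [h, PySem.List.pyRange_one_eq_nil (by omega : (arr.length : Int) ≤ idx)]
  | case2 idx h he hlt ih =>
      rw [recursiveSumEven, if_neg h, if_pos he, if_pos hlt, ih,
        PySem.List.pyRange_one_cons (by omega : idx < (arr.length : Int)),
        List.foldl_cons, if_pos he]
      conv_rhs => rw [pvFoldl_acc]
      rw [zero_add]
  | case3 idx h he hge => omega
  | case4 idx h he ho ih =>
      rw [recursiveSumEven, if_neg h, if_neg he, if_pos ho, ih,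
        PySem.List.pyRange_one_cons (by omega : idx < (arr.length : Int)),
        List.foldl_cons, if_neg he]
  | case5 idx h he ho =>
      exfalso; simp at he ho; omega

-- ===== VERDICT (by name: the statement is the Claim_ definition above) =====
theorem recursiveSumEven_spec : Claim_equal_recursiveSumEven := by
  intro arr idx _ _
  exact pvMain arr idx
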